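-- pv_equiv track=rewrite | github.com/demonet2025/webnettools | modules/ssl_bulk_checker.py | parse_hostnames_input
-- ===== SOURCE A (Python) =====
-- from typing import List, Dict, Any
--
-- def parse_hostnames_input(input_text: str) -> List[str]:
--     """Parse hostnames from input text (comma or newline separated)"""
--     if not input_text:
--         return []
--
--     # Split by both comma and newline
--     hostnames = []
--     for line in input_text.split('\n'):
--         for hostname in line.split(','):
--             hostname = hostname.strip()
--             if hostname:
--                 hostnames.append(hostname)
--
--     return hostnames
-- ===== SOURCE B (Python) =====
-- def parse_hostnames_input(input_text):
--     """Parse hostnames from input text (comma or newline separated)"""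
--     hostnames = []
--     buf = []
--     for ch in input_text:
--         if ch in ',\n':
--             token = ''.join(buf).strip()
--             if token:
--                 hostnames.append(token)
--             buf = []
--         else:
--             buf.append(ch)
--     token = ''.join(buf).strip()
--     if token:
--         hostnames.append(token)
--     return hostnames
-- ===== Notes on version B (the rewrite author's own statement) =====
-- stated objective: alternative
-- what changed: Replaces the two nested split loops (split by newline, then each line by comma) with a single character-level scan that accumulates the current token and flushes it at either delimiter.
import Mathlib
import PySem

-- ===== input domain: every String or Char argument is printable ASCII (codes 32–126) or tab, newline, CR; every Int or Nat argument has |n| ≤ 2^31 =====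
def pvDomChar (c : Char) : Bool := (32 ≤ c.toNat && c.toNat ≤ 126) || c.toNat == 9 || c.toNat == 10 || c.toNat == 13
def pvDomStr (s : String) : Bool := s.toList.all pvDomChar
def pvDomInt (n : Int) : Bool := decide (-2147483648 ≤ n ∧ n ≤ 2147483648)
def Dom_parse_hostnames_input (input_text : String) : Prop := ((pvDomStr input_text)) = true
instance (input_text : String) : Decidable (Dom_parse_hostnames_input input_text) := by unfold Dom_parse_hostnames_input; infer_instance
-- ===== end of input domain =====

-- B replaces A's nested newline/comma split loops by a single character-level scan; alternative decomposition, same cost.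


-- ===== PORT A =====
def parse_hostnames_input (input_text : String) : List String :=
  if input_text = "" then []
  else
    ((PySem.Str.split? input_text "\n").getD []).foldl (fun hostnames line =>
      ((PySem.Str.split? line ",").getD []).foldl (fun hostnames hostname =>
        let hostname' := PySem.Str.strip hostname
        if hostname' ≠ "" then hostnames ++ [hostname'] else hostnames) hostnames) []

-- ===== PORT B =====
-- one pass over the characters: flush the stripped buffer at ',' or '\n'
def pvScanB : List Char → List String → List Char → List String
  | [], hostnames, buf =>
    let token := String.ofList (PySem.Chars.strip buf)
    if token ≠ "" then hostnames ++ [token] else hostnames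
  | ch :: rest, hostnames, buf =>
    if ch = ',' ∨ ch = '\n' then
      let token := String.ofList (PySem.Chars.strip buf)
      pvScanB rest (if token ≠ "" then hostnames ++ [token] else hostnames) []
    else
      pvScanB rest hostnames (buf ++ [ch])

def parse_hostnames_input_alt (input_text : String) : List String :=
  pvScanB input_text.toList [] []

-- ===== PRECONDITION & SPEC =====
def Spec_parse_hostnames_input (input_text : String) (out : List String) : Prop := out = parse_hostnames_input_alt input_text
instance (input_text : String) (out : List String) : Decidable (Spec_parse_hostnames_input input_text out) := by unfold Spec_parse_hostnames_input; infer_instance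

-- ===== CLAIM (what is proved, stated in full; the proofs are below) =====
def Claim_equal_parse_hostnames_input : Prop := ∀ (input_text : String), Dom_parse_hostnames_input input_text → Spec_parse_hostnames_input input_text (parse_hostnames_input input_text)

-- ===== LEMMAS AND PROOFS =====

-- single-character splitOn, as a (head, tail) recursion
def pvSplitc (c : Char) : List Char → List Char × List (List Char)
  | [] => ([], [])
  | a :: cs =>
    let p := pvSplitc c cs
    if a = c then ([], p.1 :: p.2) else (a :: p.1, p.2)

-- splitting on '\n' then on ',' collapses to one recursion on characters
def pvTokens : List Char → List Char × List (List Char)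
  | [] => ([], [])
  | a :: cs =>
    let p := pvTokens cs
    if a = ',' ∨ a = '\n' then ([], p.1 :: p.2) else (a :: p.1, p.2)

def pvEmit (ls : List (List Char)) : List String :=
  ((ls.map PySem.Chars.strip).filter (· ≠ [])).map String.ofList

lemma pvSplitOn_go_eq (c : Char) (l : List Char) :
    ∀ (fuel : Nat) (cur : List Char) (acc : List (List Char)), l.length < fuel →
      PySem.Chars.splitOn.go [c] fuel l cur acc
        = acc.reverse ++ (cur.reverse ++ (pvSplitc c l).1) :: (pvSplitc c l).2 := by
  induction l with
  | nil =>
    intro fuel cur acc h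
    match fuel with
    | fuel + 1 => simp [PySem.Chars.splitOn.go, pvSplitc]
  | cons a rest ih =>
    intro fuel cur acc h
    match fuel with
    | fuel + 1 =>
      by_cases hac : a = c
      · subst hac
        have hpre : [a].isPrefixOf (a :: rest) = true := by simp [List.isPrefixOf]
        rw [PySem.Chars.splitOn.go]
        simp only [hpre, if_true, List.length_cons, List.length_nil, Nat.zero_add,
          List.drop_succ_cons, List.drop_zero]
        simp only [List.length_cons] at h
        rw [ih fuel [] ((cur.reverse) :: acc) (by omega)]
        simp [pvSplitc]
      · have : [c].isPrefixOf (a :: rest) = false := by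
          simp [List.isPrefixOf]
          exact fun h' => absurd h'.symm hac
        rw [PySem.Chars.splitOn.go]
        simp only [this, Bool.false_eq_true, if_false]
        rw [ih fuel (a :: cur) acc (by simp at h ⊢; omega)]
        simp [pvSplitc, hac]

lemma pvSplitOn_eq (c : Char) (l : List Char) :
    PySem.Chars.splitOn l [c] = (pvSplitc c l).1 :: (pvSplitc c l).2 := by
  unfold PySem.Chars.splitOn
  rw [pvSplitOn_go_eq c l (l.length + 1) [] [] (by omega)]
  simp

lemma pvFlatMap_tokens (cs : List Char) :
    ((pvSplitc '\n' cs).1 :: (pvSplitc '\n' cs).2).flatMap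
        (fun l => (pvSplitc ',' l).1 :: (pvSplitc ',' l).2)
      = (pvTokens cs).1 :: (pvTokens cs).2 := by
  induction cs with
  | nil => simp [pvSplitc, pvTokens]
  | cons a cs ih =>
    by_cases hn : a = '\n'
    · subst hn
      simp only [pvSplitc, pvTokens, if_true, if_pos (Or.inr rfl)]
      simpa [pvSplitc] using congrArg (List.cons []) ih
    · by_cases hc : a = ','
      · subst hc
        simp only [pvSplitc, pvTokens, if_neg (by decide : ¬ (',' = '\n')), if_pos (Or.inl rfl)]
        simp only [List.flatMap_cons] at ih ⊢
        simp only [pvSplitc, if_pos rfl]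
        rw [← ih]
        simp
      · simp only [pvSplitc, pvTokens, if_neg hn, if_neg (by tauto : ¬ (a = ',' ∨ a = '\n'))]
        simp only [List.flatMap_cons] at ih ⊢
        simp only [pvSplitc, if_neg hc]
        have h1 : (pvSplitc ',' (pvSplitc '\n' cs).1).1 ++ [] = (pvTokens cs).1 ∧
            (pvSplitc ',' (pvSplitc '\n' cs).1).2 ++
              (pvSplitc '\n' cs).2.flatMap (fun l => (pvSplitc ',' l).1 :: (pvSplitc ',' l).2)
              = (pvTokens cs).2 := by
          constructor
          · simpa using congrArg List.head! ih
          · simpa using congrArg List.tail ih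
        simp only [List.append_nil] at h1
        simp [h1.1, h1.2]

lemma pvEmit_append (xs ys : List (List Char)) : pvEmit (xs ++ ys) = pvEmit xs ++ pvEmit ys := by
  simp [pvEmit]

def pvEmit1 (x : List Char) : List String :=
  if PySem.Chars.strip x = [] then [] else [String.ofList (PySem.Chars.strip x)]

lemma pvOfList_eq_empty_iff (l : List Char) : String.ofList l = "" ↔ l = [] := by
  constructor
  · intro h; have := congrArg String.toList h; simpa using this
  · intro h; subst h; rfl

lemma pvEmit_cons (x : List Char) (ys : List (List Char)) :
    pvEmit (x :: ys) = pvEmit1 x ++ pvEmit ys := by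
  by_cases h : PySem.Chars.strip x = [] <;> simp [pvEmit, pvEmit1, h]

lemma pvFlush (acc : List String) (buf : List Char) :
    (if String.ofList (PySem.Chars.strip buf) ≠ "" then
        acc ++ [String.ofList (PySem.Chars.strip buf)] else acc)
      = acc ++ pvEmit1 buf := by
  by_cases h : PySem.Chars.strip buf = []
  · rw [if_neg (by simp [pvOfList_eq_empty_iff, h])]; simp [pvEmit1, h]
  · rw [if_pos (by simp [pvOfList_eq_empty_iff, h])]; simp [pvEmit1, h]

lemma pvScanB_eq (cs : List Char) :
    ∀ (acc : List String) (buf : List Char),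
      pvScanB cs acc buf = acc ++ pvEmit ((buf ++ (pvTokens cs).1) :: (pvTokens cs).2) := by
  induction cs with
  | nil =>
    intro acc buf
    simp only [pvScanB, pvTokens, List.append_nil]
    rw [pvFlush, pvEmit_cons]
    simp [pvEmit]
  | cons a cs ih =>
    intro acc buf
    by_cases hd : a = ',' ∨ a = '\n'
    · simp only [pvScanB, pvTokens, if_pos hd]
      rw [pvFlush, ih]
      simp [pvEmit_cons, List.append_assoc]
    · simp only [pvScanB, pvTokens, if_neg hd]
      rw [ih]
      simp

-- A's value in canonical form
lemma pvA_eq (input_text : String) :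
    parse_hostnames_input input_text
      = pvEmit ((pvTokens input_text.toList).1 :: (pvTokens input_text.toList).2) := by
  by_cases h0 : input_text = ""
  · subst h0
    simp only [parse_hostnames_input, if_pos rfl]
    decide
  · unfold parse_hostnames_input
    rw [if_neg h0]
    have hsplit : (PySem.Str.split? input_text "\n").getD []
        = (PySem.Chars.splitOn input_text.toList ['\n']).map String.ofList := by
      simp [PySem.Str.split?, PySem.Chars.split?]
    have hinner : ∀ (acc : List String) (line : String),
        ((PySem.Str.split? line ",").getD []).foldl (fun hostnames hostname =>
            let hostname' := PySem.Str.strip hostname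
            if hostname' ≠ "" then hostnames ++ [hostname'] else hostnames) acc
          = acc ++ pvEmit (PySem.Chars.splitOn line.toList [',']) := by
      intro acc line
      have hsp : (PySem.Str.split? line ",").getD []
          = (PySem.Chars.splitOn line.toList [',']).map String.ofList := by
        simp [PySem.Str.split?, PySem.Chars.split?]
      rw [hsp]
      rw [List.foldl_map]
      induction PySem.Chars.splitOn line.toList [','] generalizing acc with
      | nil => simp [pvEmit]
      | cons t ts ihh =>
        simp only [List.foldl_cons]
        have hstrip : PySem.Str.strip (String.ofList t) = String.ofList (PySem.Chars.strip t) := by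
          apply String.toList_injective
          simp
        rw [hstrip, pvFlush, ihh]
        simp [pvEmit_cons, List.append_assoc]
    rw [hsplit]
    rw [List.foldl_map]
    have houter : ∀ (ls : List (List Char)) (acc : List String),
        ls.foldl (fun hostnames l =>
          ((PySem.Str.split? (String.ofList l) ",").getD []).foldl (fun hostnames hostname =>
            let hostname' := PySem.Str.strip hostname
            if hostname' ≠ "" then hostnames ++ [hostname'] else hostnames) hostnames) acc
          = acc ++ pvEmit (ls.flatMap (fun l => PySem.Chars.splitOn l [','])) := by
      intro ls
      induction ls with
      | nil => intro acc; simp [pvEmit]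
      | cons l ls ihh =>
        intro acc
        simp only [List.foldl_cons]
        rw [hinner acc (String.ofList l), ihh]
        have : (String.ofList l).toList = l := by simp
        rw [this, List.flatMap_cons, pvEmit_append, List.append_assoc]
    rw [houter]
    rw [List.nil_append]
    congr 1
    rw [pvSplitOn_eq]
    have : (fun l => PySem.Chars.splitOn l [','])
        = fun l => (pvSplitc ',' l).1 :: (pvSplitc ',' l).2 := by
      funext l; exact pvSplitOn_eq ',' l
    rw [this, pvFlatMap_tokens]

-- ===== VERDICT (by name: the statement is the Claim_ definition above) =====
theorem parse_hostnames_input_spec : Claim_equal_parse_hostnames_input := by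
  intro input_text _
  unfold Spec_parse_hostnames_input parse_hostnames_input_alt
  rw [pvA_eq, pvScanB_eq]
  simp
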